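-- pv_equiv track=rewrite | github.com/cyberelf/googlefoobar | 1-solar-doomsday/solution.py | solution
-- ===== SOURCE A (Python) =====
-- import math
--
-- def solution(area):
--     """
--     :type area: int
--     :rtype: int[]
--     """
--     tiles = []
--     cur_area = 0
--     while cur_area < area:
--         area = area - cur_area
--         tile = int(math.sqrt(area))
--         cur_area = tile*tile
--         tiles.append(cur_area)
--     return tiles
-- ===== SOURCE B (Python) =====
-- import math
--
-- def solution(area):
--     if area <= 0:
--         return []
--     tile = int(math.sqrt(area))
--     sq = tile * tile
--     return [sq] + solution(area - sq)
-- ===== Notes on version B (the rewrite author's own statement) =====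
-- stated objective: simpler
-- what changed: Replaced the imperative while-loop with mutable area/cur_area/tiles state by a direct recursive decomposition that prepends the largest square and recurses on the remainder.
import Mathlib
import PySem

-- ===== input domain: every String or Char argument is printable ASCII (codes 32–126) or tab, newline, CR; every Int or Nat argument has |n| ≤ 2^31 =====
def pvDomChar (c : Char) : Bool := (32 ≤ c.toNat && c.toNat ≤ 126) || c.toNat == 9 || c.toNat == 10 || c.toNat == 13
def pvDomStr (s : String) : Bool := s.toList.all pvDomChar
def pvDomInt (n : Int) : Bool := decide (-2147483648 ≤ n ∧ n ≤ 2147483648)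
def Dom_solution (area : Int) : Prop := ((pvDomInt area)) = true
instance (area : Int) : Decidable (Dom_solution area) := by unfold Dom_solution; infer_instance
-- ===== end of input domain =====

-- B replaces A's while-loop with mutable state by a recursion that prepends the
-- largest square and recurses on the remainder (objective: simpler).

-- ===== PORT A =====
-- the while-loop of A, state (area, cur_area, tiles).
-- int(math.sqrt(area)) is ported as Nat.sqrt: exact for 1 ≤ area ≤ 2^31 (float sqrt
-- of such ints rounds to the same integer part), and area is positive inside the loop.
def solutionLoop (area cur : Int) (tiles : List Int) : List Int :=
  if _h : cur < area then
    let area' := area - cur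
    let tile : Int := (Nat.sqrt area'.toNat : Int)
    let cur' := tile * tile
    solutionLoop area' cur' (tiles ++ [cur'])
  else tiles
termination_by (area - cur).toNat
decreasing_by
  have h1 : 1 ≤ (area - cur).toNat := by omega
  have h2 : 1 ≤ Nat.sqrt (area - cur).toNat := by
    have := Nat.sqrt_le_sqrt h1
    simpa using this
  have h3 : (1 : Int) ≤ (Nat.sqrt (area - cur).toNat : Int) * (Nat.sqrt (area - cur).toNat : Int) := by
    have := Nat.mul_le_mul h2 h2
    exact_mod_cast this
  omega

def solution (area : Int) : List Int := solutionLoop area 0 []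

-- ===== PORT B =====
def solution_alt (area : Int) : List Int :=
  if _h : area ≤ 0 then []
  else
    let tile : Int := (Nat.sqrt area.toNat : Int)
    let sq := tile * tile
    sq :: solution_alt (area - sq)
termination_by area.toNat
decreasing_by
  have h1 : 1 ≤ area.toNat := by omega
  have h2 : 1 ≤ Nat.sqrt area.toNat := by
    have := Nat.sqrt_le_sqrt h1
    simpa using this
  have h2' : (1 : Int) ≤ (Nat.sqrt area.toNat : Int) * (Nat.sqrt area.toNat : Int) := by
    have := Nat.mul_le_mul h2 h2
    exact_mod_cast this
  omega

-- ===== PRECONDITION & SPEC =====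
def Spec_solution (area : Int) (out : List Int) : Prop := out = solution_alt area
instance (area : Int) (out : List Int) : Decidable (Spec_solution area out) := by unfold Spec_solution; infer_instance

-- ===== CLAIM (what is proved, stated in full; the proofs are below) =====
def Claim_equal_solution : Prop := ∀ (area : Int), Dom_solution area → Spec_solution area (solution area)

-- ===== LEMMAS AND PROOFS =====

theorem solutionLoop_eq (area cur : Int) (tiles : List Int) :
    solutionLoop area cur tiles = tiles ++ solution_alt (area - cur) := by
  fun_induction solutionLoop area cur tiles with
  | case1 area cur tiles h area' tile cur' ih =>
    rw [ih]
    conv_rhs => rw [solution_alt]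
    have hpos : ¬ (area - cur) ≤ 0 := by omega
    rw [dif_neg hpos]
    simp [area', tile, cur']
  | case2 area cur tiles h =>
    rw [solution_alt]
    have : area - cur ≤ 0 := by omega
    simp [this]

-- ===== VERDICT (by name: the statement is the Claim_ definition above) =====
theorem solution_spec : Claim_equal_solution := by
  intro area _
  unfold Spec_solution solution
  rw [solutionLoop_eq]
  simp
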